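-- pv_equiv track=rewrite | github.com/rtsoliday/medm | tests/testADL_SaveFiles.py | strip_cartesian_counts_with_pv
-- ===== SOURCE A (Python) =====
-- def strip_cartesian_counts_with_pv(lines: list[str]) -> list[str]:
--   """Remove count= lines for cartesian plots that define countPvName."""
--   to_remove: set[int] = set()
--   inside_cartesian = False
--   depth = 0
--   has_count_pv = False
--   block_count_lines: list[int] = []
--
--   for idx, line in enumerate(lines):
--     if not inside_cartesian:
--       if "\"cartesian plot\"" in line:
--         inside_cartesian = True
--         depth = line.count("{") - line.count("}")
--         has_count_pv = False
--         block_count_lines = []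
--         if depth <= 0:
--           depth = 0
--         continue
--     stripped = line.strip()
--     if inside_cartesian and depth == 1:
--       lower = stripped.lower()
--       if lower.startswith("count="):
--         block_count_lines.append(idx)
--       if "countpvname" in lower:
--         has_count_pv = True
--     if inside_cartesian:
--       depth += line.count("{")
--       depth -= line.count("}")
--       if depth <= 0:
--         if has_count_pv:
--           to_remove.update(block_count_lines)
--         inside_cartesian = False
--         depth = 0
--
--   return [line for idx, line in enumerate(lines) if idx not in to_remove]
-- ===== SOURCE B (Python) =====
-- def _take_block(lines: list[str], i: int, depth: int):
--   """Consume lines from index i until the brace depth drops to <= 0.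
--
--   Returns (block, next_index, closed) where block pairs each line with the
--   depth it was read at (the depth before its own braces are applied)."""
--   block: list[tuple[str, int]] = []
--   while i < len(lines):
--     line = lines[i]
--     block.append((line, depth))
--     depth += line.count("{") - line.count("}")
--     i += 1
--     if depth <= 0:
--       return block, i, True
--   return block, i, False
--
--
-- def _clean_block(block: list[tuple[str, int]], closed: bool) -> list[str]:
--   """Drop the depth-1 count= lines iff the closed block names a countPvName."""
--   if closed and any(d == 1 and "countpvname" in line.strip().lower()
--                     for line, d in block):
--     return [line for line, d in block
--             if not (d == 1 and line.strip().lower().startswith("count="))]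
--   return [line for line, d in block]
--
--
-- def strip_cartesian_counts_with_pv(lines: list[str]) -> list[str]:
--   """Remove count= lines for cartesian plots that define countPvName.
--
--   Block-parser decomposition: scan for a cartesian-plot header, extract the
--   whole block with per-line depths, clean it as a unit, and continue after it
--   -- instead of a line-by-line state machine marking indices for removal."""
--   out: list[str] = []
--   i = 0
--   while i < len(lines):
--     line = lines[i]
--     out.append(line)
--     i += 1
--     if "\"cartesian plot\"" in line:
--       d = line.count("{") - line.count("}")
--       block, i, closed = _take_block(lines, i, d if d > 0 else 0)
--       out.extend(_clean_block(block, closed))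
--   return out
-- ===== Notes on version B (the rewrite author's own statement) =====
-- stated objective: alternative
-- what changed: Replaces A's line-by-line state machine that marks indices for removal and filters the whole input at the end with a block-parser decomposition: scan for a cartesian-plot header, extract the entire block at once with per-line brace depths (_take_block), clean the block as a unit (_clean_block drops depth-1 count= lines iff the closed block names countPvName), and resume after the block.
import Mathlib
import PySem

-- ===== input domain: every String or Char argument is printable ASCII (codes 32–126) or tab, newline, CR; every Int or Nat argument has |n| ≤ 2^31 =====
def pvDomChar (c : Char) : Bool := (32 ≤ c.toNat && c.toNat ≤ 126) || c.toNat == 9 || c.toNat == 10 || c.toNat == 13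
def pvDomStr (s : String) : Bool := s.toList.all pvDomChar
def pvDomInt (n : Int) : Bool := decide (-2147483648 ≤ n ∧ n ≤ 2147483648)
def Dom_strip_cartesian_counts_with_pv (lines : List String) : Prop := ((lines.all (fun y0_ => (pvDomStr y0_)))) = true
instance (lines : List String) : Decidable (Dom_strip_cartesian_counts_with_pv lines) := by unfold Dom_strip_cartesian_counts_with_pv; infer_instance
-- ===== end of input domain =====

-- B replaces A's index-marking state machine (collect removable indices, filter at the end)
-- by a block-parser decomposition: extract each cartesian block whole, with per-line depths,
-- clean it as a unit, and continue after it; same return value, no speed claim.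

-- ===== PORT A =====
structure pvSA where
  rm : List Int
  ins : Bool
  dep : Int
  hp : Bool
  bcl : List Int
deriving Repr, DecidableEq

def stripA_step (st : pvSA) (p : Int × String) : pvSA :=
  if !st.ins && PySem.Str.isIn "\"cartesian plot\"" p.2 then
    let d : Int := (PySem.Str.count p.2 "{" : Int) - (PySem.Str.count p.2 "}" : Int)
    ⟨st.rm, true, if d ≤ 0 then 0 else d, false, []⟩
  else if st.ins then
    let lw := PySem.Str.lower (PySem.Str.strip p.2)
    let bcl' := if st.dep == 1 && PySem.Str.startswith lw "count=" then st.bcl ++ [p.1] else st.bcl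
    let hp' := if st.dep == 1 && PySem.Str.isIn "countpvname" lw then true else st.hp
    let d' := st.dep + (PySem.Str.count p.2 "{" : Int) - (PySem.Str.count p.2 "}" : Int)
    if d' ≤ 0 then ⟨if hp' then PySem.Set.update st.rm bcl' else st.rm, false, 0, hp', bcl'⟩
    else ⟨st.rm, true, d', hp', bcl'⟩
  else st

def strip_cartesian_counts_with_pv (lines : List String) : List String :=
  let st := (PySem.List.enumerate lines).foldl stripA_step ⟨[], false, 0, false, []⟩
  (PySem.List.enumerate lines).filterMap
    (fun p => if PySem.Set.contains st.rm p.1 then none else some p.2)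

-- ===== PORT B =====
-- the per-line depth test 'd == 1 and line.strip().lower().startswith("count=")'
def pvIsCount (q : String × Int) : Bool :=
  q.2 == 1 && PySem.Str.startswith (PySem.Str.lower (PySem.Str.strip q.1)) "count="

-- the per-line test 'd == 1 and "countpvname" in line.strip().lower()'
def pvHasPv (q : String × Int) : Bool :=
  q.2 == 1 && PySem.Str.isIn "countpvname" (PySem.Str.lower (PySem.Str.strip q.1))

-- _take_block: consume lines until the brace depth drops to <= 0; each line is paired
-- with the depth it was read at; the while-over-index loop becomes structural recursion
def takeBlockB (d : Int) : List String → List (String × Int) × List String × Bool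
  | [] => ([], [], false)
  | l :: rest =>
    let d' := d + (PySem.Str.count l "{" : Int) - (PySem.Str.count l "}" : Int)
    if d' ≤ 0 then ([(l, d)], rest, true)
    else
      let t := takeBlockB d' rest
      ((l, d) :: t.1, t.2)

-- _clean_block
def cleanBlockB (b : List (String × Int)) (closed : Bool) : List String :=
  if closed && b.any pvHasPv then (b.filter fun q => !pvIsCount q).map Prod.fst
  else b.map Prod.fst

theorem takeBlockB_rest_le (xs : List String) : ∀ d : Int, (takeBlockB d xs).2.1.length ≤ xs.length := by
  induction xs with
  | nil => intro d; simp [takeBlockB]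
  | cons l rest ih =>
    intro d
    simp only [takeBlockB]
    split_ifs
    · simp
    · have := ih (d + (PySem.Str.count l "{" : Int) - (PySem.Str.count l "}" : Int))
      simpa using Nat.le_succ_of_le this

-- the main while loop of B
def goB : List String → List String
  | [] => []
  | l :: rest =>
    if PySem.Str.isIn "\"cartesian plot\"" l then
      let d0 : Int := (PySem.Str.count l "{" : Int) - (PySem.Str.count l "}" : Int)
      let t := takeBlockB (if 0 < d0 then d0 else 0) rest
      l :: (cleanBlockB t.1 t.2.2 ++ goB t.2.1)
    else l :: goB rest
termination_by xs => xs.length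
decreasing_by
  · exact Nat.lt_succ_of_le (takeBlockB_rest_le rest _)
  · exact Nat.lt_succ_self _

def strip_cartesian_counts_with_pv_alt (lines : List String) : List String := goB lines

-- ===== PRECONDITION & SPEC =====
def Spec_strip_cartesian_counts_with_pv (lines : List String) (out : List String) : Prop := out = strip_cartesian_counts_with_pv_alt lines
instance (lines : List String) (out : List String) : Decidable (Spec_strip_cartesian_counts_with_pv lines out) := by unfold Spec_strip_cartesian_counts_with_pv; infer_instance

-- ===== CLAIM (what is proved, stated in full; the proofs are below) =====
def Claim_equal_strip_cartesian_counts_with_pv : Prop := ∀ (lines : List String), Dom_strip_cartesian_counts_with_pv lines → Spec_strip_cartesian_counts_with_pv lines (strip_cartesian_counts_with_pv lines)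

-- ===== LEMMAS AND PROOFS =====

/-- A's final list comprehension, as a function of the remembered index set. -/
def pvFilterRm (l : List (Int × String)) (rm : List Int) : List String :=
  l.filterMap (fun p => if PySem.Set.contains rm p.1 then none else some p.2)

/-- A's has_count_pv accumulation over an extracted block. -/
def hpB : Bool → List (String × Int) → Bool
  | hp, [] => hp
  | hp, q :: b => hpB (if pvHasPv q then true else hp) b

/-- A's block_count_lines accumulation over an extracted block enumerated from n. -/
def bclB : List Int → Int → List (String × Int) → List Int
  | bcl, _, [] => bcl
  | bcl, n, q :: b => bclB (if pvIsCount q then bcl ++ [n] else bcl) (n + 1) b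

theorem pv_enum_fst_le (xs : List String) (s : Int) (i : Int)
    (h : i ∈ (PySem.List.enumerate xs s).map Prod.fst) : s ≤ i := by
  induction xs generalizing s with
  | nil => simp [PySem.List.enumerate_nil] at h
  | cons x xs ih =>
    rw [PySem.List.enumerate_cons] at h
    simp only [List.map_cons, List.mem_cons] at h
    rcases h with h | h
    · omega
    · have := ih (s + 1) h; omega

theorem pv_step_rm_mono (s : pvSA) (p : Int × String) (i : Int) (h : i ∈ s.rm) :
    i ∈ (stripA_step s p).rm := by
  simp only [stripA_step]
  split_ifs <;> simp_all [PySem.Set.mem_update]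

theorem pv_rm_mono (l : List (Int × String)) (s : pvSA) (i : Int) (h : i ∈ s.rm) :
    i ∈ (l.foldl stripA_step s).rm := by
  induction l generalizing s with
  | nil => exact h
  | cons p l ih => exact ih (stripA_step s p) (pv_step_rm_mono s p i h)

theorem pv_step_back (s : pvSA) (p : Int × String) (i : Int)
    (h : i ∈ (stripA_step s p).rm ∨ ((stripA_step s p).ins = true ∧ i ∈ (stripA_step s p).bcl)) :
    i ∈ s.rm ∨ (s.ins = true ∧ i ∈ s.bcl) ∨ i = p.1 := by
  simp only [stripA_step] at h
  split_ifs at h <;> simp_all [PySem.Set.mem_update] <;> tauto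

theorem pv_rm_subset (l : List (Int × String)) (s : pvSA) (i : Int)
    (h : i ∈ (l.foldl stripA_step s).rm ∨
      ((l.foldl stripA_step s).ins = true ∧ i ∈ (l.foldl stripA_step s).bcl)) :
    i ∈ s.rm ∨ (s.ins = true ∧ i ∈ s.bcl) ∨ i ∈ l.map Prod.fst := by
  induction l generalizing s with
  | nil => exact h.imp id (fun h' => Or.inl h')
  | cons p l ih =>
    rw [List.foldl_cons] at h
    rcases ih (stripA_step s p) h with h' | h' | h'
    · rcases pv_step_back s p i (Or.inl h') with h2 | h2 | h2
      · exact Or.inl h2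
      · exact Or.inr (Or.inl h2)
      · exact Or.inr (Or.inr (by simp [h2]))
    · rcases pv_step_back s p i (Or.inr h') with h2 | h2 | h2
      · exact Or.inl h2
      · exact Or.inr (Or.inl h2)
      · exact Or.inr (Or.inr (by simp [h2]))
    · exact Or.inr (Or.inr (by simp [h']))

theorem pv_contains_false {rm : List Int} {i : Int} (h : i ∉ rm) :
    PySem.Set.contains rm i = false := by
  cases hc : PySem.Set.contains rm i with
  | false => rfl
  | true => exact absurd ((PySem.Set.contains_iff _ _).1 hc) h

theorem pv_contains_true {rm : List Int} {i : Int} (h : i ∈ rm) :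
    PySem.Set.contains rm i = true := (PySem.Set.contains_iff _ _).2 h

theorem pv_notin_final (l : List (Int × String)) (s : pvSA) (n : Int)
    (hrm : ∀ i ∈ s.rm, i < n) (hbcl2 : s.ins = true → ∀ i ∈ s.bcl, i < n)
    (hidx : ∀ i ∈ l.map Prod.fst, n < i) :
    PySem.Set.contains ((l.foldl stripA_step s).rm) n = false := by
  apply pv_contains_false
  intro hmem
  rcases pv_rm_subset l s n (Or.inl hmem) with h | h | h
  · exact absurd (hrm n h) (by omega)
  · exact absurd (hbcl2 h.1 n h.2) (by omega)
  · exact absurd (hidx n h) (by omega)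

theorem pv_mem_final_iff (l : List (Int × String)) (s : pvSA) (j : Int)
    (hins : s.ins = false) (hidx : ∀ i ∈ l.map Prod.fst, j < i) :
    (j ∈ (l.foldl stripA_step s).rm ↔ j ∈ s.rm) := by
  constructor
  · intro hmem
    rcases pv_rm_subset l s j (Or.inl hmem) with h | h | h
    · exact h
    · rw [hins] at h; simp at h
    · exact absurd (hidx j h) (by omega)
  · exact pv_rm_mono l s j

theorem pv_enum_gt (rest : List String) (n : Int) :
    ∀ i ∈ (PySem.List.enumerate rest (n + 1)).map Prod.fst, n < i := by
  intro i hi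
  have := pv_enum_fst_le rest (n + 1) i hi
  omega

theorem pvFilterRm_append (a b : List (Int × String)) (rm : List Int) :
    pvFilterRm (a ++ b) rm = pvFilterRm a rm ++ pvFilterRm b rm := by
  simp [pvFilterRm]

theorem pvFilterRm_cons_false (p : Int × String) (l : List (Int × String)) (rm : List Int)
    (h : PySem.Set.contains rm p.1 = false) :
    pvFilterRm (p :: l) rm = p.2 :: pvFilterRm l rm := by
  simp only [pvFilterRm, List.filterMap_cons]
  rw [h]
  simp

theorem pvFilterRm_cons_true (p : Int × String) (l : List (Int × String)) (rm : List Int)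
    (h : PySem.Set.contains rm p.1 = true) :
    pvFilterRm (p :: l) rm = pvFilterRm l rm := by
  simp only [pvFilterRm, List.filterMap_cons]
  rw [h]
  simp

theorem pvFilterRm_all (l : List (Int × String)) (rm : List Int)
    (h : ∀ p ∈ l, PySem.Set.contains rm p.1 = false) :
    pvFilterRm l rm = l.map Prod.snd := by
  induction l with
  | nil => rfl
  | cons p l ih =>
    rw [pvFilterRm_cons_false p l rm (h p (by simp)), ih (fun q hq => h q (by simp [hq]))]
    rfl

theorem hpB_eq (b : List (String × Int)) : ∀ hp : Bool, hpB hp b = (hp || b.any pvHasPv) := by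
  induction b with
  | nil => intro hp; simp [hpB]
  | cons q b ih =>
    intro hp
    simp only [hpB, ih, List.any_cons]
    cases hq : pvHasPv q <;> cases hp <;> simp

theorem bclB_append (b : List (String × Int)) :
    ∀ (acc : List Int) (n : Int), bclB acc n b = acc ++ bclB [] n b := by
  induction b with
  | nil => intro acc n; simp [bclB]
  | cons q b ih =>
    intro acc n
    cases hq : pvIsCount q
    · simp only [bclB, hq, Bool.false_eq_true, if_false]
      exact ih acc (n + 1)
    · simp only [bclB, hq]
      rw [if_pos trivial, if_pos trivial, ih (acc ++ [n]) (n + 1), ih ([] ++ [n]) (n + 1)]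
      simp

theorem bclB_bounds (b : List (String × Int)) :
    ∀ (n : Int) (j : Int), j ∈ bclB [] n b → n ≤ j ∧ j < n + b.length := by
  induction b with
  | nil => intro n j h; simp [bclB] at h
  | cons q b ih =>
    intro n j h
    simp only [bclB] at h
    rw [bclB_append] at h
    rcases List.mem_append.1 h with h | h
    · split_ifs at h
      · simp only [List.nil_append, List.mem_singleton] at h
        subst h
        simp only [List.length_cons]
        push_cast
        omega
      · simp at h
    · have hb := ih (n + 1) j h
      simp only [List.length_cons]
      push_cast
      omega

/-- Folding A's step over an extracted block that CLOSES: the state at the closing line. -/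
theorem bf_closed (rest : List String) : ∀ (d n : Int) (rm : List Int) (hp : Bool) (bcl : List Int),
    (takeBlockB d rest).2.2 = true →
    (PySem.List.enumerate rest n).foldl stripA_step ⟨rm, true, d, hp, bcl⟩ =
      (PySem.List.enumerate (takeBlockB d rest).2.1 (n + (takeBlockB d rest).1.length)).foldl
        stripA_step
        ⟨(if hpB hp (takeBlockB d rest).1 = true
            then PySem.Set.update rm (bclB bcl n (takeBlockB d rest).1) else rm),
         false, 0, hpB hp (takeBlockB d rest).1, bclB bcl n (takeBlockB d rest).1⟩ := by
  induction rest with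
  | nil => intro d n rm hp bcl h; simp [takeBlockB] at h
  | cons line rest ih =>
    intro d n rm hp bcl h
    rw [PySem.List.enumerate_cons, List.foldl_cons]
    have estep : stripA_step ⟨rm, true, d, hp, bcl⟩ (n, line) =
        (let d' := d + (PySem.Str.count line "{" : Int) - (PySem.Str.count line "}" : Int)
         if d' ≤ 0 then
           ⟨if (if pvHasPv (line, d) then true else hp) = true
              then PySem.Set.update rm (if pvIsCount (line, d) then bcl ++ [n] else bcl) else rm,
            false, 0, if pvHasPv (line, d) then true else hp,
            if pvIsCount (line, d) then bcl ++ [n] else bcl⟩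
         else ⟨rm, true, d', if pvHasPv (line, d) then true else hp,
               if pvIsCount (line, d) then bcl ++ [n] else bcl⟩) := by
      simp only [stripA_step, pvIsCount, pvHasPv]
      rw [if_neg (by simp : ¬ ((!(true : Bool) && PySem.Str.isIn "\"cartesian plot\"" line) = true))]
      simp
    by_cases hcl : d + (PySem.Str.count line "{" : Int) - (PySem.Str.count line "}" : Int) ≤ 0
    · -- closes at this line: the block is the singleton [(line, d)]
      have htb : takeBlockB d (line :: rest) = ([(line, d)], rest, true) := by
        simp only [takeBlockB]; rw [if_pos hcl]
      rw [estep]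
      simp only [htb, if_pos hcl]
      simp [hpB, bclB]
    · have htb : takeBlockB d (line :: rest) =
          ((line, d) :: (takeBlockB (d + (PySem.Str.count line "{" : Int) - (PySem.Str.count line "}" : Int)) rest).1,
           (takeBlockB (d + (PySem.Str.count line "{" : Int) - (PySem.Str.count line "}" : Int)) rest).2) := by
        simp only [takeBlockB]; rw [if_neg hcl]
      have hcont : (takeBlockB (d + (PySem.Str.count line "{" : Int) - (PySem.Str.count line "}" : Int)) rest).2.2 = true := by
        rw [htb] at h; exact h
      rw [estep]
      simp only [if_neg hcl]
      rw [ih _ (n + 1) rm _ _ hcont]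
      simp only [htb, hpB, bclB]
      have hlen : n + 1 + ((takeBlockB (d + (PySem.Str.count line "{" : Int) - (PySem.Str.count line "}" : Int)) rest).1.length : Int)
          = n + (((line, d) :: (takeBlockB (d + (PySem.Str.count line "{" : Int) - (PySem.Str.count line "}" : Int)) rest).1).length : Int) := by
        simp; omega
      rw [hlen]

/-- Folding A's step over an extracted block that does NOT close: rm is untouched, still inside. -/
theorem bf_open (rest : List String) : ∀ (d n : Int) (rm : List Int) (hp : Bool) (bcl : List Int),
    (takeBlockB d rest).2.2 = false →
    ((PySem.List.enumerate rest n).foldl stripA_step ⟨rm, true, d, hp, bcl⟩).rm = rm ∧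
    ((PySem.List.enumerate rest n).foldl stripA_step ⟨rm, true, d, hp, bcl⟩).ins = true := by
  induction rest with
  | nil => intro d n rm hp bcl _; exact ⟨rfl, rfl⟩
  | cons line rest ih =>
    intro d n rm hp bcl h
    by_cases hcl : d + (PySem.Str.count line "{" : Int) - (PySem.Str.count line "}" : Int) ≤ 0
    · exfalso
      simp only [takeBlockB] at h
      rw [if_pos hcl] at h
      simp at h
    · have hcont : (takeBlockB (d + (PySem.Str.count line "{" : Int) - (PySem.Str.count line "}" : Int)) rest).2.2 = false := by
        simp only [takeBlockB] at h
        rw [if_neg hcl] at h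
        exact h
      rw [PySem.List.enumerate_cons, List.foldl_cons]
      have estep : stripA_step ⟨rm, true, d, hp, bcl⟩ (n, line) =
          ⟨rm, true, d + (PySem.Str.count line "{" : Int) - (PySem.Str.count line "}" : Int),
           if pvHasPv (line, d) then true else hp,
           if pvIsCount (line, d) then bcl ++ [n] else bcl⟩ := by
        simp only [stripA_step, pvIsCount, pvHasPv]
        rw [if_neg (by simp : ¬ ((!(true : Bool) && PySem.Str.isIn "\"cartesian plot\"" line) = true)),
          if_pos trivial, if_neg hcl]
        rfl
      rw [estep]
      exact ih _ (n + 1) rm _ _ hcont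

theorem takeBlockB_fst (rest : List String) : ∀ d : Int,
    rest = (takeBlockB d rest).1.map Prod.fst ++ (takeBlockB d rest).2.1 := by
  induction rest with
  | nil => intro d; simp [takeBlockB]
  | cons line rest ih =>
    intro d
    simp only [takeBlockB]
    split_ifs
    · simp
    · simp only [List.map_cons, List.cons_append, List.cons.injEq, true_and]
      exact ih _

theorem takeBlockB_open (rest : List String) : ∀ d : Int,
    (takeBlockB d rest).2.2 = false → (takeBlockB d rest).2.1 = [] := by
  induction rest with
  | nil => intro d _; rfl
  | cons line rest ih =>
    intro d h
    simp only [takeBlockB] at h ⊢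
    split_ifs at h ⊢ with hcl
    · exact ih _ h

/-- Filtering an extracted block by any index set F that holds exactly on the count=
    lines of the block (when hpf) yields B's cleaned block. -/
theorem filter_block (b : List (String × Int)) : ∀ (n : Int) (F : List Int) (hpf : Bool),
    (∀ j : Int, n ≤ j → j < n + b.length →
      (PySem.Set.contains F j = true ↔ (hpf = true ∧ j ∈ bclB [] n b))) →
    pvFilterRm (PySem.List.enumerate (b.map Prod.fst) n) F =
      (if hpf = true then (b.filter fun q => !pvIsCount q).map Prod.fst else b.map Prod.fst) := by
  induction b with
  | nil =>
    intro n F hpf _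
    cases hpf <;> simp [pvFilterRm, PySem.List.enumerate_nil]
  | cons q b ih =>
    intro n F hpf h
    have hmemn : n ∈ bclB [] n (q :: b) ↔ pvIsCount q = true := by
      simp only [bclB]
      rw [bclB_append]
      constructor
      · intro hm
        rcases List.mem_append.1 hm with hm | hm
        · split_ifs at hm with hq
          · exact hq
          · simp at hm
        · have := (bclB_bounds b (n + 1) n hm).1; omega
      · intro hq
        rw [if_pos hq]
        simp
    have hcn : PySem.Set.contains F n = (hpf && pvIsCount q) := by
      cases hv : PySem.Set.contains F n with
      | true =>
        have h2 := (h n (le_refl n) (by simp only [List.length_cons]; push_cast; omega)).1 hv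
        simp [h2.1, hmemn.1 h2.2]
      | false =>
        cases hpf with
        | false => simp
        | true =>
          cases hq : pvIsCount q with
          | false => simp
          | true =>
            exfalso
            have := (h n (le_refl n) (by simp only [List.length_cons]; push_cast; omega)).2 ⟨rfl, hmemn.2 hq⟩
            rw [hv] at this; exact absurd this (by decide)
    have htail : ∀ j : Int, n + 1 ≤ j → j < n + 1 + b.length →
        (PySem.Set.contains F j = true ↔ (hpf = true ∧ j ∈ bclB [] (n + 1) b)) := by
      intro j h1 h2
      have := h j (by omega) (by simp only [List.length_cons]; push_cast; omega)
      rw [this]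
      constructor
      · rintro ⟨hh, hm⟩
        refine ⟨hh, ?_⟩
        simp only [bclB] at hm
        rw [bclB_append] at hm
        rcases List.mem_append.1 hm with hm | hm
        · split_ifs at hm <;> simp at hm; omega
        · exact hm
      · rintro ⟨hh, hm⟩
        refine ⟨hh, ?_⟩
        simp only [bclB]
        rw [bclB_append]
        exact List.mem_append.2 (Or.inr hm)
    have ihb := ih (n + 1) F hpf htail
    simp only [List.map_cons, PySem.List.enumerate_cons]
    cases hpf with
    | false =>
      simp only [Bool.false_and] at hcn
      rw [pvFilterRm_cons_false _ _ _ hcn, ihb]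
      simp
    | true =>
      cases hq : pvIsCount q with
      | true =>
        rw [hq] at hcn
        simp only [Bool.true_and] at hcn
        rw [pvFilterRm_cons_true _ _ _ hcn, ihb]
        simp [hq]
      | false =>
        rw [hq] at hcn
        simp only [Bool.true_and] at hcn
        rw [pvFilterRm_cons_false _ _ _ hcn, ihb]
        simp [hq]

/-- Main invariant: from any not-inside state whose remembered indices lie below n,
    A's filter of the remaining enumerated suffix equals B's block-wise output. -/
theorem pv_out : ∀ (k : Nat) (rest : List String), rest.length ≤ k →
    ∀ (n : Int) (rm : List Int) (dp : Int) (hp : Bool) (bc : List Int),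
    (∀ i ∈ rm, i < n) →
    pvFilterRm (PySem.List.enumerate rest n)
        ((PySem.List.enumerate rest n).foldl stripA_step ⟨rm, false, dp, hp, bc⟩).rm
      = goB rest := by
  intro k
  induction k with
  | zero =>
    intro rest hlen n rm dp hp bc _
    have : rest = [] := List.eq_nil_of_length_eq_zero (Nat.le_zero.1 hlen)
    subst this
    simp [pvFilterRm, PySem.List.enumerate_nil, goB]
  | succ k ih =>
    intro rest hlen n rm dp hp bc hrm
    cases rest with
    | nil => simp [pvFilterRm, PySem.List.enumerate_nil, goB]
    | cons line rest' =>
      have hlen' : rest'.length ≤ k := by simp at hlen; omega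
      rw [PySem.List.enumerate_cons, List.foldl_cons]
      by_cases hq : PySem.Str.isIn "\"cartesian plot\"" line = true
      · -- header line: A enters a block, B extracts it whole
        have estep : stripA_step ⟨rm, false, dp, hp, bc⟩ (n, line) =
            ⟨rm, true,
             if ((PySem.Str.count line "{" : Int) - (PySem.Str.count line "}" : Int)) ≤ 0 then 0
             else ((PySem.Str.count line "{" : Int) - (PySem.Str.count line "}" : Int)),
             false, []⟩ := by
          simp only [stripA_step]
          rw [if_pos (show (!(false : Bool) && PySem.Str.isIn "\"cartesian plot\"" line) = true by
            simp only [Bool.not_false, Bool.true_and]; exact hq)]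
        rw [estep]
        have hd0 : (if ((PySem.Str.count line "{" : Int) - (PySem.Str.count line "}" : Int)) ≤ 0 then 0
             else ((PySem.Str.count line "{" : Int) - (PySem.Str.count line "}" : Int)))
            = (if 0 < ((PySem.Str.count line "{" : Int) - (PySem.Str.count line "}" : Int))
               then ((PySem.Str.count line "{" : Int) - (PySem.Str.count line "}" : Int)) else 0) := by
          split_ifs <;> omega
        rw [hd0]
        set d : Int := (if 0 < ((PySem.Str.count line "{" : Int) - (PySem.Str.count line "}" : Int))
               then ((PySem.Str.count line "{" : Int) - (PySem.Str.count line "}" : Int)) else 0) with hd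
        set t := takeBlockB d rest' with htdef
        have hgo : goB (line :: rest') = line :: (cleanBlockB t.1 t.2.2 ++ goB t.2.1) := by
          rw [goB]
          rw [if_pos hq]
        have hsplit := takeBlockB_fst rest' d
        rw [← htdef] at hsplit
        cases hc : t.2.2 with
        | true =>
          -- the block closes
          have hbf := bf_closed rest' d (n + 1) rm false [] (by rw [← htdef]; exact hc)
          rw [← htdef] at hbf
          set hpf := hpB false t.1 with hhpf
          set bclf := bclB [] (n + 1) t.1 with hbclf
          set rm' := (if hpf = true then PySem.Set.update rm bclf else rm) with hrm'
          set m0 : Int := n + 1 + (t.1.length : Int) with hm0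
          rw [hbf]
          set FIN := (PySem.List.enumerate t.2.1 m0).foldl stripA_step ⟨rm', false, 0, hpf, bclf⟩ with hFIN
          have hrm'bound : ∀ i ∈ rm', i < m0 := by
            intro i hi
            rw [hrm'] at hi
            split_ifs at hi with hh
            · rcases (PySem.Set.mem_update _ _ _).1 hi with hi | hi
              · have := hrm i hi; omega
              · have := bclB_bounds t.1 (n + 1) i hi; omega
            · have := hrm i hi; omega
          have hfin_iff : ∀ j : Int, j < m0 → (j ∈ FIN.rm ↔ j ∈ rm') := by
            intro j hj
            exact pv_mem_final_iff _ _ j rfl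
              (fun i hi => lt_of_lt_of_le hj (pv_enum_fst_le t.2.1 m0 i hi))
          -- the header itself is kept
          have hhead : PySem.Set.contains FIN.rm n = false := by
            apply pv_contains_false
            intro hm
            have := (hfin_iff n (by omega)).1 hm
            rw [hrm'] at this
            split_ifs at this with hh
            · rcases (PySem.Set.mem_update _ _ _).1 this with hi | hi
              · have := hrm n hi; omega
              · have := bclB_bounds t.1 (n + 1) n hi; omega
            · have := hrm n this; omega
          rw [pvFilterRm_cons_false (n, line) _ _ hhead]
          -- split the suffix into the block and the remainder
          have henum : PySem.List.enumerate rest' (n + 1)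
              = PySem.List.enumerate (t.1.map Prod.fst) (n + 1) ++ PySem.List.enumerate t.2.1 m0 := by
            conv_lhs => rw [hsplit]
            rw [PySem.List.enumerate_append]
            simp [hm0]
          rw [henum, pvFilterRm_append]
          -- the block portion is filtered exactly as B cleans it
          have hblock : pvFilterRm (PySem.List.enumerate (t.1.map Prod.fst) (n + 1)) FIN.rm
              = (if hpf = true then (t.1.filter fun q => !pvIsCount q).map Prod.fst
                 else t.1.map Prod.fst) := by
            apply filter_block
            intro j h1 h2
            rw [show PySem.Set.contains FIN.rm j = true ↔ j ∈ FIN.rm from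
              ⟨fun hh => (PySem.Set.contains_iff _ _).1 hh, fun hh => pv_contains_true hh⟩]
            rw [hfin_iff j (by omega)]
            rw [hrm', ← hbclf]
            constructor
            · intro hm
              split_ifs at hm with hh
              · rcases (PySem.Set.mem_update _ _ _).1 hm with hi | hi
                · exact absurd (hrm j hi) (by omega)
                · exact ⟨hh, hi⟩
              · exact absurd (hrm j hm) (by omega)
            · rintro ⟨hh, hm⟩
              rw [if_pos hh]
              exact (PySem.Set.mem_update _ _ _).2 (Or.inr hm)
          rw [hblock]
          -- the remainder: induction hypothesis
          have hrest : pvFilterRm (PySem.List.enumerate t.2.1 m0) FIN.rm = goB t.2.1 := by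
            have hlen2 : t.2.1.length ≤ k :=
              le_trans (by rw [htdef]; exact takeBlockB_rest_le rest' d) hlen'
            exact ih t.2.1 hlen2 m0 rm' 0 hpf bclf hrm'bound
          rw [hrest, hgo]
          have hclean : cleanBlockB t.1 t.2.2
              = (if hpf = true then (t.1.filter fun q => !pvIsCount q).map Prod.fst
                 else t.1.map Prod.fst) := by
            rw [cleanBlockB, hc, hhpf, hpB_eq]
            simp only [Bool.true_and, Bool.false_or]
          rw [hclean]
        | false =>
          -- the block never closes: everything is kept
          have hbf := bf_open rest' d (n + 1) rm false [] (by rw [← htdef]; exact hc)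
          have hall : pvFilterRm (PySem.List.enumerate rest' (n + 1))
              ((PySem.List.enumerate rest' (n + 1)).foldl stripA_step ⟨rm, true, d, false, []⟩).rm
              = rest' := by
            rw [hbf.1, pvFilterRm_all]
            · exact PySem.List.map_snd_enumerate rest' (n + 1)
            · intro p hp'
              apply pv_contains_false
              intro hm
              have h1 := hrm p.1 hm
              have h2 := pv_enum_fst_le rest' (n + 1) p.1 (List.mem_map.2 ⟨p, hp', rfl⟩)
              omega
          have hkeep : PySem.Set.contains
              (((PySem.List.enumerate rest' (n + 1)).foldl stripA_step ⟨rm, true, d, false, []⟩).rm) n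
              = false := by
            rw [hbf.1]
            apply pv_contains_false
            intro hm
            exact absurd (hrm n hm) (by omega)
          rw [pvFilterRm_cons_false (n, line) _ _ hkeep, hall, hgo]
          have hr : t.2.1 = [] := by rw [htdef]; exact takeBlockB_open rest' d hc
          have hcl : cleanBlockB t.1 t.2.2 = t.1.map Prod.fst := by
            rw [cleanBlockB, hc]; simp
          rw [hr, hcl]
          conv_lhs => rw [hsplit, hr]
          simp [goB]
      · -- ordinary line outside any block: kept verbatim
        have estep : stripA_step ⟨rm, false, dp, hp, bc⟩ (n, line) = ⟨rm, false, dp, hp, bc⟩ := by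
          simp only [stripA_step]
          rw [if_neg (show ¬ ((!(false : Bool) && PySem.Str.isIn "\"cartesian plot\"" line) = true) by
            simp only [Bool.not_false, Bool.true_and]; exact hq)]
          rw [if_neg (show ¬ ((false : Bool) = true) by simp)]
        rw [estep]
        have hkeep : PySem.Set.contains
            (((PySem.List.enumerate rest' (n + 1)).foldl stripA_step ⟨rm, false, dp, hp, bc⟩).rm) n
            = false :=
          pv_notin_final _ _ n (fun i hi => hrm i hi) (fun habs => by simp at habs)
            (pv_enum_gt rest' n)
        rw [pvFilterRm_cons_false (n, line) _ _ hkeep]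
        rw [ih rest' hlen' (n + 1) rm dp hp bc (fun i hi => by have := hrm i hi; omega)]
        rw [goB, if_neg hq]

-- ===== VERDICT (by name: the statement is the Claim_ definition above) =====
theorem strip_cartesian_counts_with_pv_spec : Claim_equal_strip_cartesian_counts_with_pv := by
  intro lines _
  unfold Spec_strip_cartesian_counts_with_pv
  have h := pv_out lines.length lines (le_refl _) 0 [] 0 false [] (by simp)
  simpa [strip_cartesian_counts_with_pv, strip_cartesian_counts_with_pv_alt, pvFilterRm,
    PySem.List.enumerate] using h
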